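-- pv_equiv track=rewrite | github.com/itsmedongyeon/BOJ | 2621.py | function5
-- ===== SOURCE A (Python) =====
-- def function5(deck):
--     deck=sorted(deck,key=lambda x: x[1])
--     for i in range(4):
--         if deck[i][1]+1==deck[i+1][1]: #check whether number is continuous
--             continue
--         else:
--             return 0
--     return 500+deck[4][1]
-- ===== SOURCE B (Python) =====
-- def function5(deck):
--     ranks = [r for _, r in deck]
--     m = min(ranks)
--     if all(ranks.count(m + i) == 1 for i in range(4)) and m + 4 in ranks:
--         return 500 + m + 4
--     return 0
-- ===== Notes on version B (the rewrite author's own statement) =====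
-- stated objective: simpler
-- what changed: B drops the sort-and-adjacency scan entirely: it takes m = min(ranks) and decides the straight by multiplicity counts (each of m..m+3 occurs exactly once and m+4 is present), returning 500+m+4.
import Mathlib
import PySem

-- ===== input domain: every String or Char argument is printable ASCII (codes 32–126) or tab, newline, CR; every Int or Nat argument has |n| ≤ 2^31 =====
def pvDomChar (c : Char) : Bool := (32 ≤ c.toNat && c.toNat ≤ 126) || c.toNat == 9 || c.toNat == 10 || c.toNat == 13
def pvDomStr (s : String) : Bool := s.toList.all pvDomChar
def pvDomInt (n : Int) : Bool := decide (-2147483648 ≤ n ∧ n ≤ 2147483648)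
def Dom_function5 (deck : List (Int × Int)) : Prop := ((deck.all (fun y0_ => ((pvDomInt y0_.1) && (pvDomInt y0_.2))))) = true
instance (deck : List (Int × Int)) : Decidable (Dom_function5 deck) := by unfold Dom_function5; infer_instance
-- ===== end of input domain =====

-- B replaces A's sort-and-adjacency scan by a count-based straight test around min(ranks) (simpler, no sort).

-- ===== PORT A =====
-- the 'for i in range(4)' loop with early 'return 0'
def function5Loop (d : List (Int × Int)) : List Int → Int
  | [] => 500 + (PySem.List.pyGetD d 4 (0, 0)).2          -- deck[4][1]; in range under Pre_
  | i :: rest =>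
      if (PySem.List.pyGetD d i (0, 0)).2 + 1 = (PySem.List.pyGetD d (i + 1) (0, 0)).2 then
        function5Loop d rest                               -- continue
      else 0                                               -- return 0

def function5 (deck : List (Int × Int)) : Int :=
  let d := PySem.List.sorted deck (fun x => x.2) false     -- sorted(deck, key=lambda x: x[1])
  function5Loop d (PySem.List.pyRange 0 4 1)

-- ===== PORT B =====
def function5_alt (deck : List (Int × Int)) : Int :=
  let ranks := deck.map (fun c => c.2)
  let m := (PySem.List.min? ranks (fun x => x)).getD 0     -- min(ranks); ranks ≠ [] under Pre_
  if ((PySem.List.pyRange 0 4 1).all (fun i => PySem.List.count ranks (m + i) == 1))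
      && ranks.contains (m + 4) then
    500 + m + 4
  else 0

-- ===== PRECONDITION & SPEC =====
-- Pre_ excludes exactly the inputs on which A raises IndexError: the empty deck and the
-- short (<5 card) decks whose ranks form one duplicate-free consecutive run, where A's
-- adjacency loop never fails a comparison and runs off the end of the list.
def Pre_function5 (deck : List (Int × Int)) : Prop :=
  5 ≤ deck.length ∨ (deck ≠ [] ∧
    ¬ ((deck.map (fun c => c.2)).Nodup ∧
       ∀ x ∈ deck.map (fun c => c.2), ∀ y ∈ deck.map (fun c => c.2),
         x - y < (deck.length : Int)))
instance (deck : List (Int × Int)) : Decidable (Pre_function5 deck) := by unfold Pre_function5; infer_instance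
def pvWitness_function5 : (List (Int × Int)) := [(1, 1), (2, 2), (3, 3), (0, 4), (1, 5)]

def Spec_function5 (deck : List (Int × Int)) (out : Int) : Prop := out = function5_alt deck
instance (deck : List (Int × Int)) (out : Int) : Decidable (Spec_function5 deck out) := by unfold Spec_function5; infer_instance

-- ===== CLAIM (what is proved, stated in full; the proofs are below) =====
def Claim_equal_function5 : Prop := ∀ (deck : List (Int × Int)), Dom_function5 deck → Pre_function5 deck → Spec_function5 deck (function5 deck)

-- ===== LEMMAS AND PROOFS =====

-- values strictly below every element of t do not occur in t
lemma count_tail_zero (t : List Int) (r4 v : Int) (ht : ∀ x ∈ t, r4 ≤ x) (hv : v < r4) :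
    t.count v = 0 :=
  List.count_eq_zero.mpr (fun h => absurd (ht v h) (by omega))

-- the heart: on a sorted 5-prefix the adjacency chain ≡ the count/membership test
lemma straight_iff (r0 r1 r2 r3 r4 : Int) (t : List Int)
    (h01 : r0 ≤ r1) (h12 : r1 ≤ r2) (h23 : r2 ≤ r3) (h34 : r3 ≤ r4)
    (ht : ∀ x ∈ t, r4 ≤ x) :
    (r0 + 1 = r1 ∧ r1 + 1 = r2 ∧ r2 + 1 = r3 ∧ r3 + 1 = r4) ↔
    ((r0 :: r1 :: r2 :: r3 :: r4 :: t).count r0 = 1 ∧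
     (r0 :: r1 :: r2 :: r3 :: r4 :: t).count (r0 + 1) = 1 ∧
     (r0 :: r1 :: r2 :: r3 :: r4 :: t).count (r0 + 2) = 1 ∧
     (r0 :: r1 :: r2 :: r3 :: r4 :: t).count (r0 + 3) = 1 ∧
     (r0 + 4) ∈ (r0 :: r1 :: r2 :: r3 :: r4 :: t)) := by
  constructor
  · rintro ⟨e1, e2, e3, e4⟩
    have t0 : t.count r0 = 0 := count_tail_zero t r4 r0 ht (by omega)
    have t1 : t.count (r0 + 1) = 0 := count_tail_zero t r4 (r0 + 1) ht (by omega)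
    have t2 : t.count (r0 + 2) = 0 := count_tail_zero t r4 (r0 + 2) ht (by omega)
    have t3 : t.count (r0 + 3) = 0 := count_tail_zero t r4 (r0 + 3) ht (by omega)
    refine ⟨?_, ?_, ?_, ?_, ?_⟩
    · simp [List.count_cons, t0]; omega
    · simp [List.count_cons, t1]; split_ifs <;> omega
    · simp [List.count_cons, t2]; split_ifs <;> omega
    · simp [List.count_cons, t3]; split_ifs <;> omega
    · simp; omega
  · rintro ⟨c0, c1, c2, c3, hm⟩
    have hrest0 : (r1 :: r2 :: r3 :: r4 :: t).count r0 = 0 := by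
      have h := List.count_cons_self (a := r0) (l := r1 :: r2 :: r3 :: r4 :: t)
      omega
    have hne0 := List.count_eq_zero.mp hrest0
    have h1lt : r0 < r1 := by
      rcases lt_or_eq_of_le h01 with h | h
      · exact h
      · exact (hne0 (by simp [h])).elim
    have hr1 : r1 = r0 + 1 := by
      by_contra hgt
      have : (r0 + 1) ∉ (r0 :: r1 :: r2 :: r3 :: r4 :: t) := by
        simp only [List.mem_cons, not_or]
        exact ⟨by omega, by omega, by omega, by omega, by omega,
               fun hx => absurd (ht _ hx) (by omega)⟩
      rw [← List.count_eq_zero] at this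
      omega
    rw [hr1] at c1 c2 c3 hm
    have hrest1 : (r2 :: r3 :: r4 :: t).count (r0 + 1) = 0 := by
      have ha := List.count_cons_of_ne (a := r0 + 1) (b := r0)
        (l := (r0 + 1) :: r2 :: r3 :: r4 :: t) (by omega)
      have hb := List.count_cons_self (a := r0 + 1) (l := r2 :: r3 :: r4 :: t)
      omega
    have hne1 := List.count_eq_zero.mp hrest1
    have hr2 : r2 = r0 + 2 := by
      by_contra hgt
      have h2lt : r0 + 1 < r2 := by
        rcases lt_or_eq_of_le (show r0 + 1 ≤ r2 by omega) with h | h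
        · exact h
        · exact (hne1 (by simp [← h])).elim
      have : (r0 + 2) ∉ (r0 :: (r0 + 1) :: r2 :: r3 :: r4 :: t) := by
        simp only [List.mem_cons, not_or]
        exact ⟨by omega, by omega, by omega, by omega, by omega,
               fun hx => absurd (ht _ hx) (by omega)⟩
      rw [← List.count_eq_zero] at this
      omega
    rw [hr2] at c2 c3 hm
    have hrest2 : (r3 :: r4 :: t).count (r0 + 2) = 0 := by
      have ha := List.count_cons_of_ne (a := r0 + 2) (b := r0)
        (l := (r0 + 1) :: (r0 + 2) :: r3 :: r4 :: t) (by omega)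
      have hb := List.count_cons_of_ne (a := r0 + 2) (b := r0 + 1)
        (l := (r0 + 2) :: r3 :: r4 :: t) (by omega)
      have hc := List.count_cons_self (a := r0 + 2) (l := r3 :: r4 :: t)
      omega
    have hne2 := List.count_eq_zero.mp hrest2
    have hr3 : r3 = r0 + 3 := by
      by_contra hgt
      have h3lt : r0 + 2 < r3 := by
        rcases lt_or_eq_of_le (show r0 + 2 ≤ r3 by omega) with h | h
        · exact h
        · exact (hne2 (by simp [← h])).elim
      have : (r0 + 3) ∉ (r0 :: (r0 + 1) :: (r0 + 2) :: r3 :: r4 :: t) := by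
        simp only [List.mem_cons, not_or]
        exact ⟨by omega, by omega, by omega, by omega, by omega,
               fun hx => absurd (ht _ hx) (by omega)⟩
      rw [← List.count_eq_zero] at this
      omega
    rw [hr3] at c3 hm
    have hrest3 : (r4 :: t).count (r0 + 3) = 0 := by
      have ha := List.count_cons_of_ne (a := r0 + 3) (b := r0)
        (l := (r0 + 1) :: (r0 + 2) :: (r0 + 3) :: r4 :: t) (by omega)
      have hb := List.count_cons_of_ne (a := r0 + 3) (b := r0 + 1)
        (l := (r0 + 2) :: (r0 + 3) :: r4 :: t) (by omega)
      have hc := List.count_cons_of_ne (a := r0 + 3) (b := r0 + 2)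
        (l := (r0 + 3) :: r4 :: t) (by omega)
      have hd := List.count_cons_self (a := r0 + 3) (l := r4 :: t)
      omega
    have hne3 := List.count_eq_zero.mp hrest3
    have h4lt : r0 + 3 < r4 := by
      rcases lt_or_eq_of_le (show r0 + 3 ≤ r4 by omega) with h | h
      · exact h
      · exact (hne3 (by simp [← h])).elim
    have hr4 : r4 = r0 + 4 := by
      simp only [List.mem_cons] at hm
      rcases hm with h | h | h | h | h | h
      · omega
      · omega
      · omega
      · omega
      · omega
      · have := ht _ h; omega
    exact ⟨by omega, by omega, by omega, by omega⟩

-- evaluate B's port once min(ranks) is known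
lemma alt_eval (deck : List (Int × Int)) (m : Int)
    (hmin : PySem.List.min? (deck.map fun c => c.2) (fun x => x) = some m) :
    function5_alt deck =
      (if PySem.List.count (deck.map fun c => c.2) m = 1 ∧
          PySem.List.count (deck.map fun c => c.2) (m + 1) = 1 ∧
          PySem.List.count (deck.map fun c => c.2) (m + 2) = 1 ∧
          PySem.List.count (deck.map fun c => c.2) (m + 3) = 1 ∧
          (m + 4) ∈ (deck.map fun c => c.2)
       then 500 + m + 4 else 0) := by
  have hR : PySem.List.pyRange 0 4 1 = [0, 1, 2, 3] := by decide
  simp only [function5_alt, hmin, Option.getD_some, hR, List.all_cons, List.all_nil,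
    Bool.and_eq_true, beq_iff_eq, List.contains_eq_mem, decide_eq_true_eq, Bool.and_true]
  simp only [add_zero, and_assoc]

lemma function5_eq_long (deck : List (Int × Int)) (hpre : 5 ≤ deck.length) :
    function5 deck = function5_alt deck := by
  rcases hds : PySem.List.sorted deck (fun x => x.2) false
    with _ | ⟨p0, _ | ⟨p1, _ | ⟨p2, _ | ⟨p3, _ | ⟨p4, t⟩⟩⟩⟩⟩
  all_goals try (exfalso
                 have hl := PySem.List.length_sorted deck (fun x => x.2) false
                 rw [hds] at hl
                 simp at hl
                 omega)
  -- the only surviving case: sorted deck = p0 :: p1 :: p2 :: p3 :: p4 :: t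
  have hperm : (p0 :: p1 :: p2 :: p3 :: p4 :: t).Perm deck := by
    rw [← hds]; exact PySem.List.sorted_perm deck (fun x => x.2) false
  have hpair : List.Pairwise (fun a b : Int × Int => a.2 ≤ b.2)
      (p0 :: p1 :: p2 :: p3 :: p4 :: t) := by
    rw [← hds]; exact PySem.List.sorted_pairwise deck (fun x => x.2)
  simp only [List.pairwise_cons] at hpair
  obtain ⟨a0, a1, a2, a3, a4, -⟩ := hpair
  have h01 : p0.2 ≤ p1.2 := a0 _ (by simp)
  have h12 : p1.2 ≤ p2.2 := a1 _ (by simp)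
  have h23 : p2.2 ≤ p3.2 := a2 _ (by simp)
  have h34 : p3.2 ≤ p4.2 := a3 _ (by simp)
  have ht : ∀ x ∈ t.map (fun c : Int × Int => c.2), p4.2 ≤ x := by
    intro x hx
    rcases List.mem_map.mp hx with ⟨c, hc, rfl⟩
    exact a4 c hc
  -- value of A
  have hA : function5 deck =
      (if p0.2 + 1 = p1.2 then if p1.2 + 1 = p2.2 then if p2.2 + 1 = p3.2 then
        if p3.2 + 1 = p4.2 then 500 + p4.2 else 0 else 0 else 0 else 0) := by
    show function5Loop (PySem.List.sorted deck (fun x => x.2) false)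
        (PySem.List.pyRange 0 4 1) = _
    rw [hds]
    have hR : PySem.List.pyRange 0 4 1 = [0, 1, 2, 3] := by decide
    rw [hR]
    simp [function5Loop, PySem.List.pyGetD_ofNat', List.getD]
  -- min(ranks) = p0.2
  have hne : deck.map (fun c => c.2) ≠ [] := by
    intro h
    have hnil : deck = [] := by
      cases deck with
      | nil => rfl
      | cons a l => simp at h
    subst hnil
    simp at hpre
  obtain ⟨m, hmin⟩ : ∃ m, PySem.List.min? (deck.map fun c => c.2) (fun x => x) = some m := by
    cases h : PySem.List.min? (deck.map fun c => c.2) (fun x => x) with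
    | none => exact absurd ((PySem.List.min?_eq_none_iff _ _).mp h) hne
    | some m => exact ⟨m, rfl⟩
  have hm0 : m = p0.2 := by
    have hmem := PySem.List.min?_mem hmin
    have hle := PySem.List.min?_isMin hmin
    have hup : p0.2 ≤ m := by
      rcases List.mem_map.mp hmem with ⟨c, hc, hcm⟩
      have h1 : p0.2 ≤ c.2 := PySem.List.key_head_sorted_le deck (fun x => x.2) hds c hc
      have h2 : c.2 = m := hcm
      omega
    have hdown : m ≤ p0.2 :=
      hle _ (List.mem_map_of_mem (hperm.subset (by simp)))
    omega
  -- counts and membership transfer along the permutation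
  have hcount : ∀ v : Int, PySem.List.count (deck.map fun c => c.2) v
      = (p0.2 :: p1.2 :: p2.2 :: p3.2 :: p4.2 :: t.map (fun c => c.2)).count v := by
    intro v
    rw [PySem.List.count_eq]
    have hp := (hperm.map (fun c : Int × Int => c.2)).count_eq (a := v)
    simpa using hp.symm
  have hmem4 : ((p0.2 + 4) ∈ (deck.map fun c => c.2)) ↔
      ((p0.2 + 4) ∈ (p0.2 :: p1.2 :: p2.2 :: p3.2 :: p4.2 :: t.map (fun c => c.2))) := by
    have := (hperm.map (fun c : Int × Int => c.2)).mem_iff (a := p0.2 + 4)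
    simpa using this.symm
  have key := straight_iff p0.2 p1.2 p2.2 p3.2 p4.2 (t.map fun c => c.2) h01 h12 h23 h34 ht
  rw [hA, alt_eval deck m hmin, hm0]
  by_cases hs : (p0.2 + 1 = p1.2 ∧ p1.2 + 1 = p2.2 ∧ p2.2 + 1 = p3.2 ∧ p3.2 + 1 = p4.2)
  · have hcc := key.mp hs
    obtain ⟨e1, e2, e3, e4⟩ := hs
    have hcond : PySem.List.count (deck.map fun c => c.2) p0.2 = 1 ∧
        PySem.List.count (deck.map fun c => c.2) (p0.2 + 1) = 1 ∧
        PySem.List.count (deck.map fun c => c.2) (p0.2 + 2) = 1 ∧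
        PySem.List.count (deck.map fun c => c.2) (p0.2 + 3) = 1 ∧
        (p0.2 + 4) ∈ (deck.map fun c => c.2) :=
      ⟨by rw [hcount]; exact hcc.1, by rw [hcount]; exact hcc.2.1,
       by rw [hcount]; exact hcc.2.2.1, by rw [hcount]; exact hcc.2.2.2.1,
       hmem4.mpr hcc.2.2.2.2⟩
    rw [if_pos hcond, if_pos e1, if_pos e2, if_pos e3, if_pos e4]
    omega
  · have hncond : ¬(PySem.List.count (deck.map fun c => c.2) p0.2 = 1 ∧
        PySem.List.count (deck.map fun c => c.2) (p0.2 + 1) = 1 ∧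
        PySem.List.count (deck.map fun c => c.2) (p0.2 + 2) = 1 ∧
        PySem.List.count (deck.map fun c => c.2) (p0.2 + 3) = 1 ∧
        (p0.2 + 4) ∈ (deck.map fun c => c.2)) := by
      intro hc
      apply hs
      apply key.mpr
      exact ⟨by rw [← hcount]; exact hc.1, by rw [← hcount]; exact hc.2.1,
             by rw [← hcount]; exact hc.2.2.1, by rw [← hcount]; exact hc.2.2.2.1,
             hmem4.mp hc.2.2.2.2⟩
    rw [if_neg hncond]
    split_ifs with e1 e2 e3 e4
    · exact absurd ⟨e1, e2, e3, e4⟩ hs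
    all_goals rfl

lemma alt_short_zero (deck : List (Int × Int)) (hne : deck ≠ []) (hlen : deck.length < 5) :
    function5_alt deck = 0 := by
  have hne' : deck.map (fun c => c.2) ≠ [] := by
    intro h
    have hnil : deck = [] := by cases deck with | nil => rfl | cons a l => simp at h
    exact hne hnil
  obtain ⟨m, hmin⟩ : ∃ m, PySem.List.min? (deck.map fun c => c.2) (fun x => x) = some m := by
    cases h : PySem.List.min? (deck.map fun c => c.2) (fun x => x) with
    | none => exact absurd ((PySem.List.min?_eq_none_iff _ _).mp h) hne'
    | some m => exact ⟨m, rfl⟩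
  rw [alt_eval deck m hmin, if_neg]
  intro hc
  obtain ⟨c0, c1, c2, c3, c4⟩ := hc
  have h0 : m ∈ deck.map (fun c => c.2) := by
    rw [PySem.List.count_eq] at c0; exact List.count_pos_iff.mp (by omega)
  have h1 : m + 1 ∈ deck.map (fun c => c.2) := by
    rw [PySem.List.count_eq] at c1; exact List.count_pos_iff.mp (by omega)
  have h2 : m + 2 ∈ deck.map (fun c => c.2) := by
    rw [PySem.List.count_eq] at c2; exact List.count_pos_iff.mp (by omega)
  have h3 : m + 3 ∈ deck.map (fun c => c.2) := by
    rw [PySem.List.count_eq] at c3; exact List.count_pos_iff.mp (by omega)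
  have hsub : [m, m + 1, m + 2, m + 3, m + 4] ⊆ deck.map (fun c => c.2) := by
    intro x hx
    simp only [List.mem_cons, List.not_mem_nil, or_false] at hx
    rcases hx with rfl | rfl | rfl | rfl | rfl
    exacts [h0, h1, h2, h3, c4]
  have hnd : ([m, m + 1, m + 2, m + 3, m + 4] : List Int).Nodup := by
    simp [List.nodup_cons]
  have hle := (List.subperm_of_subset hnd hsub).length_le
  rw [List.length_map] at hle
  have h5 : (5 : Nat) ≤ deck.length := by simpa using hle
  omega

lemma a_short_zero (deck : List (Int × Int)) (hne : deck ≠ []) (hlen : deck.length < 5)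
    (hnrun : ¬ ((deck.map (fun c => c.2)).Nodup ∧
       ∀ x ∈ deck.map (fun c => c.2), ∀ y ∈ deck.map (fun c => c.2),
         x - y < (deck.length : Int))) :
    function5 deck = 0 := by
  have hR : PySem.List.pyRange 0 4 1 = [0, 1, 2, 3] := by decide
  have hlen' := PySem.List.length_sorted deck (fun x => x.2) false
  rcases hds : PySem.List.sorted deck (fun x => x.2) false
    with _ | ⟨p0, _ | ⟨p1, _ | ⟨p2, _ | ⟨p3, _ | ⟨p4, t⟩⟩⟩⟩⟩
  · exact absurd ((PySem.List.sorted_eq_nil_iff _ _ _).mp hds) hne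
  · show function5Loop (PySem.List.sorted deck (fun x => x.2) false)
        (PySem.List.pyRange 0 4 1) = 0
    rw [hds, hR]
    simp [function5Loop, PySem.List.pyGetD_ofNat', List.getD]
  · show function5Loop (PySem.List.sorted deck (fun x => x.2) false)
        (PySem.List.pyRange 0 4 1) = 0
    rw [hds, hR]
    simp [function5Loop, PySem.List.pyGetD_ofNat', List.getD]
  · show function5Loop (PySem.List.sorted deck (fun x => x.2) false)
        (PySem.List.pyRange 0 4 1) = 0
    rw [hds, hR]
    simp [function5Loop, PySem.List.pyGetD_ofNat', List.getD]
  · -- four cards: the run exclusion is what makes A's loop fail a comparison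
    have hperm : ([p0, p1, p2, p3] : List (Int × Int)).Perm deck := by
      rw [← hds]; exact PySem.List.sorted_perm deck (fun x => x.2) false
    have hL : deck.length = 4 := by rw [← hperm.length_eq]; rfl
    have hchain : ¬ (p0.2 + 1 = p1.2 ∧ p1.2 + 1 = p2.2 ∧ p2.2 + 1 = p3.2) := by
      rintro ⟨e1, e2, e3⟩
      apply hnrun
      have hmapperm : (([p0, p1, p2, p3] : List (Int × Int)).map (fun c => c.2)).Perm
          (deck.map (fun c => c.2)) := hperm.map _
      constructor
      · have hnd4 : ([p0.2, p1.2, p2.2, p3.2] : List Int).Nodup := by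
          simp [List.nodup_cons]
          omega
        exact hmapperm.nodup_iff.mp (by simpa using hnd4)
      · intro x hx y hy
        have hx' : x ∈ [p0.2, p1.2, p2.2, p3.2] := by
          have := hmapperm.mem_iff.mpr hx; simpa using this
        have hy' : y ∈ [p0.2, p1.2, p2.2, p3.2] := by
          have := hmapperm.mem_iff.mpr hy; simpa using this
        simp only [List.mem_cons, List.not_mem_nil, or_false] at hx' hy'
        rw [hL]
        rcases hx' with rfl | rfl | rfl | rfl <;> rcases hy' with rfl | rfl | rfl | rfl <;> omega
    show function5Loop (PySem.List.sorted deck (fun x => x.2) false)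
        (PySem.List.pyRange 0 4 1) = 0
    rw [hds, hR]
    simp [function5Loop, PySem.List.pyGetD_ofNat', List.getD]
    intros
    exact absurd ⟨‹p0.2 + 1 = p1.2›, ‹p1.2 + 1 = p2.2›, ‹p2.2 + 1 = p3.2›⟩ hchain
  · exfalso
    rw [hds] at hlen'
    simp at hlen'
    omega

theorem function5_eq (deck : List (Int × Int)) (hpre : Pre_function5 deck) :
    function5 deck = function5_alt deck := by
  unfold Pre_function5 at hpre
  by_cases h5 : 5 ≤ deck.length
  · exact function5_eq_long deck h5
  · rcases hpre with h | ⟨hne, hnrun⟩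
    · exact absurd h h5
    · rw [a_short_zero deck hne (by omega) hnrun, alt_short_zero deck hne (by omega)]

-- ===== VERDICT (by name: the statement is the Claim_ definition above) =====
theorem function5_spec : Claim_equal_function5 := by
  intro deck _ hpre
  exact function5_eq deck hpre
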